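-- pv_equiv track=rewrite | github.com/SongJungHyun1004/Home_IoT_Control | rasberry_pi/kocom_ser2net.py | _doorlock_parse
-- ===== SOURCE A (Python) =====
-- def _doorlock_parse(d_value):
--     hex_ascii = ''
--     str_ascii = ''
--     num = 1
--     for i in d_value:
--         hex_ascii += i
--         if num % 2 == 0:
--             # 16진수 10진수 변환
--             ascii = int(hex_ascii, 16)
--             # 10진수 ascii코드로 변환
--             str_ascii += chr(ascii)
--             hex_ascii = ''
--         num += 1
--     return {'doorlock':str_ascii}
-- ===== SOURCE B (Python) =====
-- def _doorlock_parse(d_value):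
--     npairs = len(d_value) // 2
--     return {'doorlock': ''.join(chr(int(d_value[2*i:2*i+2], 16)) for i in range(npairs))}
-- ===== Notes on version B (the rewrite author's own statement) =====
-- stated objective: simpler
-- what changed: Replaces the stateful char-by-char loop with a parity counter and two string accumulators by a direct str.join over pair indices range(len//2), slicing each 2-char chunk.
import Mathlib
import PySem

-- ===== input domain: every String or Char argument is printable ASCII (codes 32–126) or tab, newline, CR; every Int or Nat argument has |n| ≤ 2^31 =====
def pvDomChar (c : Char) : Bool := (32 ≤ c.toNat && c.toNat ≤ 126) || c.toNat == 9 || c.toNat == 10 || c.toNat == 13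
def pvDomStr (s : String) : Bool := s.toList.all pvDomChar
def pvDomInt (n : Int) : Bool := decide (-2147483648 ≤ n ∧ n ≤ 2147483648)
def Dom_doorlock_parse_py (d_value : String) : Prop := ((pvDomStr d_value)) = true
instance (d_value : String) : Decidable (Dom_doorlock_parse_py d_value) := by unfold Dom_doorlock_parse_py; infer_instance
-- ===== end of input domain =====

-- B replaces A's stateful char-by-char loop (parity counter + two accumulators) by a
-- ''.join over pair indices; equivalent wherever A returns (Pre_ excludes A's ValueErrors).

-- chr(int(chunk, 16)) as both Pythons write it (defaults are unreachable under Pre_)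
def pvDec (l : List Char) : Char :=
  Char.ofNat ((PySem.Int.ofCharsBase? l 16).getD 0).toNat

-- ===== PORT A =====
-- loop body: hex_ascii += i; if num % 2 == 0: decode, flush; num += 1
def pvStepA (st : List Char × List Char × Nat) (i : Char) : List Char × List Char × Nat :=
  let hex := st.1 ++ [i]
  if st.2.2 % 2 == 0 then ([], st.2.1 ++ [pvDec hex], st.2.2 + 1)
  else (hex, st.2.1, st.2.2 + 1)

def doorlock_parse_py (d_value : String) : List (String × String) :=
  let st := d_value.toList.foldl pvStepA ([], [], 1)
  [("doorlock", String.mk st.2.1)]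

-- ===== PORT B =====
def doorlock_parse_py_alt (d_value : String) : List (String × String) :=
  let cs := d_value.toList
  let npairs := PySem.Int.floordiv (cs.length : Int) 2
  [("doorlock", String.mk ((PySem.List.pyRange 0 npairs 1).map (fun i =>
      pvDec (PySem.List.slice cs (some (2 * i)) (some (2 * i + 2))))))]

-- ===== PRECONDITION & SPEC =====
-- the complete 2-char chunk parses under int(·,16) and is nonnegative (so chr accepts it)
def pvHexPairOk (a b : Char) : Bool :=
  match PySem.Int.ofCharsBase? [a, b] 16 with
  | some n => decide (0 ≤ n)
  | none => false

-- Pre_ excludes exactly the inputs on which A raises: some complete pair fails int(·,16)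
-- (ValueError) or parses negative, where chr raises.
def Pre_doorlock_parse_py (d_value : String) : Prop :=
  ∀ i, i < d_value.toList.length / 2 →
    pvHexPairOk (d_value.toList.getD (2 * i) ' ') (d_value.toList.getD (2 * i + 1) ' ') = true

instance (d_value : String) : Decidable (Pre_doorlock_parse_py d_value) := by
  unfold Pre_doorlock_parse_py; infer_instance

def pvWitness_doorlock_parse_py : String := "41a"

def Spec_doorlock_parse_py (d_value : String) (out : List (String × String)) : Prop := out = doorlock_parse_py_alt d_value
instance (d_value : String) (out : List (String × String)) : Decidable (Spec_doorlock_parse_py d_value out) := by unfold Spec_doorlock_parse_py; infer_instance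

-- ===== CLAIM (what is proved, stated in full; the proofs are below) =====
def Claim_equal_doorlock_parse_py : Prop := ∀ (d_value : String), Dom_doorlock_parse_py d_value → Pre_doorlock_parse_py d_value → Spec_doorlock_parse_py d_value (doorlock_parse_py d_value)

-- ===== LEMMAS AND PROOFS =====

-- common characterisation: decode consecutive complete pairs, drop a trailing odd char
def pvPairs : List Char → List Char
  | a :: b :: t => pvDec [a, b] :: pvPairs t
  | [_] => []
  | [] => []

theorem pvLoopA (cs : List Char) : ∀ (acc : List Char) (k : Nat),
    (cs.foldl pvStepA ([], acc, 2 * k + 1)).2.1 = acc ++ pvPairs cs := by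
  induction cs using pvPairs.induct with
  | case1 a b t ih =>
    intro acc k
    have e1 : pvStepA ([], acc, 2 * k + 1) a = ([a], acc, 2 * k + 2) := by
      have h : (2 * k + 1) % 2 = 1 := by omega
      simp [pvStepA, h]
    have e2 : pvStepA ([a], acc, 2 * k + 2) b = ([], acc ++ [pvDec [a, b]], 2 * (k + 1) + 1) := by
      have h : (2 * k + 2) % 2 = 0 := by omega
      have h2 : 2 * k + 2 + 1 = 2 * (k + 1) + 1 := by omega
      simp [pvStepA, h, h2]
    rw [List.foldl_cons, e1, List.foldl_cons, e2, ih, pvPairs]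
    simp
  | case2 a =>
    intro acc k
    have h : (2 * k + 1) % 2 = 1 := by omega
    simp [List.foldl, pvStepA, h, pvPairs]
  | case3 =>
    intro acc k; simp [pvPairs]

theorem pvLoopB (cs : List Char) :
    (List.range (cs.length / 2)).map (fun k => pvDec ((cs.drop (2 * k)).take 2)) = pvPairs cs := by
  induction cs using pvPairs.induct with
  | case1 a b t ih =>
    have hl : (a :: b :: t).length / 2 = t.length / 2 + 1 := by simp; omega
    rw [hl, List.range_succ_eq_map, List.map_cons, List.map_map, pvPairs]
    refine List.cons_eq_cons.mpr ⟨rfl, ?_⟩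
    rw [← ih]
    apply List.map_congr_left
    intro k _
    have hd : (a :: b :: t).drop (2 * (k + 1)) = t.drop (2 * k) := by
      rw [show 2 * (k + 1) = 2 * k + 1 + 1 from by omega]
      simp
    simp [Function.comp, hd]
  | case2 a => simp [pvPairs]
  | case3 => simp [pvPairs]

theorem doorlock_parse_py_spec : Claim_equal_doorlock_parse_py := by
  intro d _ _
  unfold Spec_doorlock_parse_py doorlock_parse_py doorlock_parse_py_alt
  have hf : PySem.Int.floordiv ((d.toList.length : Nat) : Int) 2 = ((d.toList.length / 2 : Nat) : Int) := by
    unfold PySem.Int.floordiv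
    rw [Int.fdiv_eq_ediv]
    simp
  dsimp only
  rw [show (([], [], 1) : List Char × List Char × Nat) = ([], [], 2 * 0 + 1) from rfl,
      pvLoopA d.toList [] 0, List.nil_append, hf, PySem.List.pyRange_one]
  rw [show ((((d.toList.length / 2 : Nat) : Int) - 0).toNat) = d.toList.length / 2 by omega]
  rw [List.map_map]
  have hm : List.map ((fun i => pvDec (PySem.List.slice d.toList (some (2 * i)) (some (2 * i + 2)))) ∘ fun (k : Nat) => (0 : Int) + (k : Int)) (List.range (d.toList.length / 2)) = List.map (fun k => pvDec ((d.toList.drop (2 * k)).take 2)) (List.range (d.toList.length / 2)) := by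
    apply List.map_congr_left
    intro k _
    simp only [Function.comp_apply, Int.zero_add]
    rw [show (2 * (k : Int)) = ((2 * k : Nat) : Int) by push_cast; ring,
        show (((2 * k : Nat) : Int) + 2) = ((2 * k : Nat) : Int) + ((2 : Nat) : Int) by norm_num,
        PySem.List.slice_natCast_add]
  rw [hm, pvLoopB]
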